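-- pv_equiv track=rewrite | github.com/naumovda/python | matrices.py | row_equals_col
-- ===== SOURCE A (Python) =====
-- def row_equals_col(matrix):
--     '''
--     Return numbers of rows which are equal to
--     columns with same indices
--     Parameters:
--         matrix: array
--             Input square matrix
--     '''
--     size = len(matrix)
--     nums = []
--     for i in range(size):
--         equal = True
--         for j in range(size):
--             if matrix[i][j] != matrix[j][i]:
--                 equal = False
--                 break
--         if equal:
--             nums.append(i+1)
--     return nums
-- ===== SOURCE B (Python) =====
-- def row_equals_col(matrix):
--     '''Return 1-based indices of rows equal to the same-index column,
--     via an explicit transpose table and whole-list comparisons.'''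
--     size = len(matrix)
--     cols = [[row[i] for row in matrix] for i in range(size)]
--     return [i + 1 for i in range(size) if matrix[i][:size] == cols[i]]
-- ===== Notes on version B (the rewrite author's own statement) =====
-- stated objective: simpler
-- what changed: B builds the transpose once as a table of column lists and does one pass appending i+1 when row i equals column i by whole-list comparison, replacing A's nested element-wise loop with a break flag.
-- outside the precondition, e.g. on row_equals_col([[1, 2], [0]]): A returns [], B raises IndexError
import Mathlib
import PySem

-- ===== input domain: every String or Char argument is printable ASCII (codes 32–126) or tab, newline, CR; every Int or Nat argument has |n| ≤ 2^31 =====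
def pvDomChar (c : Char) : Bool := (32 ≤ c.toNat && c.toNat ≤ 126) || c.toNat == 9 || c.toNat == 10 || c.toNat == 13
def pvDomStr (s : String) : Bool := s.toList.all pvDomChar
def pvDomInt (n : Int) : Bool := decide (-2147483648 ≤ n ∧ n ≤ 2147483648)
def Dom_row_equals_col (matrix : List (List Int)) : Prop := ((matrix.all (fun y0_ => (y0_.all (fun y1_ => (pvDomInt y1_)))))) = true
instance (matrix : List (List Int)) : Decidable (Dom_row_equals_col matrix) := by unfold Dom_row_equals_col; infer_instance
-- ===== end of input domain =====

-- B replaces A's nested element-wise loop with break by an explicit transpose table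
-- plus one pass comparing whole lists (objective: simpler).


-- ===== PORT A =====
-- matrix[a][b] (in-range under Pre_; default values are never reached there)
def pvG (matrix : List (List Int)) (a b : Int) : Int :=
  PySem.List.pyGetD (PySem.List.pyGetD matrix a []) b 0

-- the inner 'for j in range(size): if … : equal = False; break' loop, returning the flag
def pvAInner (matrix : List (List Int)) (i : Int) : List Int → Bool
  | [] => true
  | j :: js => if pvG matrix i j ≠ pvG matrix j i then false else pvAInner matrix i js

def row_equals_col (matrix : List (List Int)) : List Int :=
  let size : Int := matrix.length
  (PySem.List.pyRange 0 size 1).foldl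
    (fun nums i => if pvAInner matrix i (PySem.List.pyRange 0 size 1) then nums ++ [i + 1] else nums) []

-- ===== PORT B =====
def row_equals_col_alt (matrix : List (List Int)) : List Int :=
  let size : Int := matrix.length
  let cols : List (List Int) :=
    (PySem.List.pyRange 0 size 1).map (fun i => matrix.map (fun row => PySem.List.pyGetD row i 0))
  ((PySem.List.pyRange 0 size 1).filter
      (fun i => PySem.List.slice (PySem.List.pyGetD matrix i []) none (some size)
                  == PySem.List.pyGetD cols i [])).map (fun i => i + 1)

-- ===== PRECONDITION & SPEC =====
-- Pre_ excludes matrices having a row shorter than the number of rows: there A raises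
-- IndexError unless an earlier element mismatch breaks first, and B's transpose
-- construction always raises IndexError.
def Pre_row_equals_col (matrix : List (List Int)) : Prop :=
  ∀ row ∈ matrix, matrix.length ≤ row.length
instance (matrix : List (List Int)) : Decidable (Pre_row_equals_col matrix) := by
  unfold Pre_row_equals_col; infer_instance
def pvWitness_row_equals_col : List (List Int) := [[1, 2], [2, 1]]

def Spec_row_equals_col (matrix : List (List Int)) (out : List Int) : Prop := out = row_equals_col_alt matrix
instance (matrix : List (List Int)) (out : List Int) : Decidable (Spec_row_equals_col matrix out) := by unfold Spec_row_equals_col; infer_instance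

-- ===== CLAIM (what is proved, stated in full; the proofs are below) =====
def Claim_equal_row_equals_col : Prop := ∀ (matrix : List (List Int)), Dom_row_equals_col matrix → Pre_row_equals_col matrix → Spec_row_equals_col matrix (row_equals_col matrix)

-- ===== LEMMAS AND PROOFS =====

-- A's inner loop returns true iff no index in the list witnesses a mismatch
theorem pvAInner_eq_true_iff (matrix : List (List Int)) (i : Int) (js : List Int) :
    pvAInner matrix i js = true ↔ ∀ j ∈ js, pvG matrix i j = pvG matrix j i := by
  induction js with
  | nil => simp [pvAInner]
  | cons j js ih =>
      by_cases h : pvG matrix i j = pvG matrix j i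
      · simp [pvAInner, h, ih]
      · simp [pvAInner, h]

-- B's whole-list comparison at index i agrees with A's inner loop, under Pre_
theorem pvG_elem (matrix : List (List Int)) (a b : Int) (ha : 0 ≤ a)
    (haN : a.toNat < matrix.length) (hb : 0 ≤ b)
    (hbN : b.toNat < matrix[a.toNat].length) :
    pvG matrix a b = matrix[a.toNat][b.toNat] := by
  unfold pvG
  rw [PySem.List.pyGetD_of_nonneg _ _ ha, List.getD_eq_getElem _ _ haN,
      PySem.List.pyGetD_of_nonneg _ _ hb, List.getD_eq_getElem _ _ hbN]

theorem pv_cond_eq (matrix : List (List Int))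
    (hpre : ∀ row ∈ matrix, matrix.length ≤ row.length)
    (i : Int) (hi0 : 0 ≤ i) (hi1 : i < (matrix.length : Int)) :
    (PySem.List.slice (PySem.List.pyGetD matrix i []) none (some (matrix.length : Int))
       == PySem.List.pyGetD
            ((PySem.List.pyRange 0 (matrix.length : Int) 1).map
              (fun t => matrix.map (fun row => PySem.List.pyGetD row t 0))) i [])
      = pvAInner matrix i (PySem.List.pyRange 0 (matrix.length : Int) 1) := by
  have hiN : i.toNat < matrix.length := by omega
  have hcast : i = (i.toNat : Int) := by omega
  rw [hcast, PySem.List.pyGetD_map_pyRange _ matrix.length i.toNat [] hiN, ← hcast]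
  have hrow : PySem.List.pyGetD matrix i [] = matrix[i.toNat] := by
    rw [PySem.List.pyGetD_of_nonneg _ _ hi0, List.getD_eq_getElem _ _ hiN]
  have hrowlen : matrix.length ≤ matrix[i.toNat].length := hpre _ (List.getElem_mem hiN)
  rw [Bool.eq_iff_iff, beq_iff_eq, pvAInner_eq_true_iff, hrow,
      PySem.List.slice_to _ (by positivity)]
  have htake : (matrix[i.toNat].take ((matrix.length : Int)).toNat).length
      = matrix.length := by
    rw [List.length_take, Int.toNat_natCast]; omega
  constructor
  · intro heq j hj
    rw [PySem.List.mem_pyRange_one] at hj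
    have hjN : j.toNat < matrix.length := by omega
    have hj0 : 0 ≤ j := hj.1
    have hjrowlen : matrix.length ≤ matrix[j.toNat].length := hpre _ (List.getElem_mem hjN)
    have := congrArg (fun l => l.getD j.toNat 0) heq
    simp only [List.getD_eq_getElem?_getD, List.getElem?_take, Int.toNat_natCast,
      List.getElem?_map] at this
    rw [if_pos hjN, List.getElem?_eq_getElem (show j.toNat < matrix[i.toNat].length by omega),
        List.getElem?_eq_getElem hjN] at this
    simp only [Option.map_some, Option.getD_some] at this
    rw [PySem.List.pyGetD_eq_getElem _ 0 hi0 (by exact_mod_cast by omega)] at this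
    rw [pvG_elem matrix i j hi0 hiN hj0 (by omega),
        pvG_elem matrix j i hj0 hjN hi0 (by omega)]
    exact this
  · intro hall
    apply List.ext_getElem
    · rw [htake, List.length_map]
    · intro k hk1 hk2
      have hkN : k < matrix.length := by rw [htake] at hk1; exact hk1
      have hkrowlen : matrix.length ≤ matrix[k].length := hpre _ (List.getElem_mem hkN)
      have hmem : ((k : Nat) : Int) ∈ PySem.List.pyRange 0 (matrix.length : Int) 1 := by
        rw [PySem.List.mem_pyRange_one]; omega
      have hg := hall _ hmem
      rw [pvG_elem matrix i (k : Int) hi0 hiN (by positivity)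
            (by simp only [Int.toNat_natCast]; omega),
          pvG_elem matrix (k : Int) i (by positivity)
            (by simp only [Int.toNat_natCast]; omega) hi0
            (by simp only [Int.toNat_natCast]; omega)] at hg
      simp only [Int.toNat_natCast] at hg
      rw [List.getElem_take, List.getElem_map, hg,
          PySem.List.pyGetD_eq_getElem _ 0 hi0 (by exact_mod_cast by omega)]

-- ===== VERDICT (by name: the statement is the Claim_ definition above) =====
theorem row_equals_col_spec : Claim_equal_row_equals_col := by
  intro matrix _ hpre
  unfold Spec_row_equals_col row_equals_col row_equals_col_alt
  rw [PySem.List.foldl_append_if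
        (fun i => pvAInner matrix i (PySem.List.pyRange 0 (matrix.length : Int) 1))
        (fun i => i + 1)]
  simp only [List.nil_append]
  congr 1
  apply List.filter_congr
  intro i hi
  rw [PySem.List.mem_pyRange_one] at hi
  exact (pv_cond_eq matrix hpre i hi.1 hi.2).symm
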